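-- pv_equiv track=rewrite | github.com/jarrodmillman/capstone | tools/nb2rst.py | proc_notebook
-- ===== SOURCE A (Python) =====
-- def line_indent(line):
--     return len(line) - len(line.lstrip())
--
-- def is_empty(line):
--     return line.strip() == ''
--
-- def proc_body(body, indent):
--     spaces = ' ' * indent
--     new_body = ['.. plot::\n', spaces + ':context:\n']
--     plts = [line for line in body if line.strip().startswith('plt.')]
--     if len(plts) == 0:
--         new_body.append(spaces + ':nofigs:\n')
--     new_body.append('\n')
--     # Ignore trailing blank lines
--     n_good = len(body)
--     for line in body[::-1]:
--         if not is_empty(line):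
--             break
--         n_good -= 1
--
--     for line in body[:n_good]:
--         if is_empty(line):
--             new_body.append(line)
--             continue
--         L_indent = line_indent(line)
--         if L_indent == indent:
--             new_line = spaces + '>>> ' + line.lstrip()
--             new_body.append(new_line)
--             continue
--         extra_spaces = ' ' * (L_indent - indent)
--         new_line = spaces + '... ' + extra_spaces + line.lstrip()
--         new_body.append(new_line)
--     return new_body
--
-- def _p_default(line, new_contents):
--     if line.startswith('.. code:: python'):
--         return 'code-block-line0'
--     elif not line.startswith('.. image::'):
--         # Discard image lines
--         new_contents.append(line)
--     return 'default'
--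
-- def proc_notebook(contents):
--     new_contents = []
--     state = 'default'
--     for line in contents:
--         if state == 'default':
--             state = _p_default(line, new_contents)
--             continue
--         if state == 'code-block-line0':
--             if line.strip() == '':
--                 continue
--             block_indent = line_indent(line)
--             block_body = []
--             state = 'code-block-body'
--         if state == 'code-block-body':
--             if not is_empty(line) and line_indent(line) < block_indent:
--                 state = 'waiting-for-pl'
--                 new_contents += proc_body(block_body, block_indent)
--             block_body.append(line)
--         if state == 'waiting-for-pl':
--             if line.startswith('.. parsed-literal::'):
--                 state = 'in-pl-line0'
--                 continue
--             new_contents.append('\n')  # Restore trailing blank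
--             new_contents.append(line)
--             state = 'default'
--         if state == 'in-pl-line0':
--             if is_empty(line):
--                 continue
--             pl_indent = line_indent(line)
--             state = 'in-pl'
--         if state == 'in-pl':
--             if not is_empty(line) and line_indent(line) < pl_indent:
--                 state = _p_default(line, new_contents)
--                 continue
--             if line.strip().startswith('<matplotlib.'):
--                 line = ' ' * line_indent(line) + '<...>\n'
--             elif line.strip().startswith('[<matplotlib.'):
--                 line = ' ' * line_indent(line) + '[...]\n'
--             new_contents.append(line)
--
--     return new_contents
-- ===== SOURCE B (Python) =====
-- def line_indent(line):
--     return len(line) - len(line.lstrip())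
--
-- def is_empty(line):
--     return line.strip() == ''
--
-- def proc_body(body, indent):
--     spaces = ' ' * indent
--     new_body = ['.. plot::\n', spaces + ':context:\n']
--     plts = [line for line in body if line.strip().startswith('plt.')]
--     if len(plts) == 0:
--         new_body.append(spaces + ':nofigs:\n')
--     new_body.append('\n')
--     n_good = len(body)
--     for line in body[::-1]:
--         if not is_empty(line):
--             break
--         n_good -= 1
--     for line in body[:n_good]:
--         if is_empty(line):
--             new_body.append(line)
--             continue
--         L_indent = line_indent(line)
--         if L_indent == indent:
--             new_body.append(spaces + '>>> ' + line.lstrip())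
--             continue
--         new_body.append(spaces + '... ' + ' ' * (L_indent - indent) + line.lstrip())
--     return new_body
--
-- def proc_notebook(contents):
--     out = []
--     n = len(contents)
--     i = 0
--     while i < n:
--         line = contents[i]
--         if line.startswith('.. code:: python'):
--             i += 1
--             # skip blank lines before the block body
--             while i < n and is_empty(contents[i]):
--                 i += 1
--             if i >= n:
--                 break
--             block_indent = line_indent(contents[i])
--             body = []
--             while i < n and (is_empty(contents[i]) or line_indent(contents[i]) >= block_indent):
--                 body.append(contents[i])
--                 i += 1
--             if i >= n:
--                 break  # unterminated block is dropped
--             out += proc_body(body, block_indent)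
--             line = contents[i]
--             if line.startswith('.. parsed-literal::'):
--                 i += 1
--                 # skip blank lines, then copy the literal block with substitutions
--                 while i < n and is_empty(contents[i]):
--                     i += 1
--                 if i >= n:
--                     break
--                 pl_indent = line_indent(contents[i])
--                 while i < n:
--                     l = contents[i]
--                     if not is_empty(l) and line_indent(l) < pl_indent:
--                         break  # re-dispatch this line at top level
--                     s = l.strip()
--                     if s.startswith('<matplotlib.'):
--                         l = ' ' * line_indent(l) + '<...>\n'
--                     elif s.startswith('[<matplotlib.'):
--                         l = ' ' * line_indent(l) + '[...]\n'
--                     out.append(l)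
--                     i += 1
--             else:
--                 out.append('\n')  # restore trailing blank
--                 out.append(line)
--                 i += 1
--         elif line.startswith('.. image::'):
--             i += 1  # discard image lines
--         else:
--             out.append(line)
--             i += 1
--     return out
-- ===== Notes on version B (the rewrite author's own statement) =====
-- stated objective: alternative
-- what changed: Replaced A's single-pass fall-through state machine with a cursor-based parser: an outer dispatch loop with dedicated inner loops that skip blanks, collect a code-block body, and copy a parsed-literal block, re-dispatching dedent lines at top level.
import Mathlib
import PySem

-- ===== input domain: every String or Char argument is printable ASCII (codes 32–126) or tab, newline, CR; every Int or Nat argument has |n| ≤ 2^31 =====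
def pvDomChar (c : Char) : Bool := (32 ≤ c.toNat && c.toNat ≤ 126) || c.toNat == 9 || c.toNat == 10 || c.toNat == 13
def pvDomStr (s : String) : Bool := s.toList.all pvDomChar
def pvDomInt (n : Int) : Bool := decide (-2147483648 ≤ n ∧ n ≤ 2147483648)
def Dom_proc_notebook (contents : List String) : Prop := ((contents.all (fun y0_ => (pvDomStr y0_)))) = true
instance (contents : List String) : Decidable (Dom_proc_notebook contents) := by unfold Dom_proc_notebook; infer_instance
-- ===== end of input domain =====

-- B rewrites proc_notebook as an explicit cursor-based parser with nested loops per block,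
-- replacing A's single-pass fall-through state machine; objective: alternative decomposition.


-- ===== SHARED HELPERS (the Python module's helpers line_indent / is_empty / proc_body,
-- used verbatim by both A and B) =====

-- ' ' * n
def pvSpaces (n : Nat) : String := String.ofList (List.replicate n ' ')

-- s1 + s2 on str (via List Char; Lean's String.append is kernel-opaque)
def pvCat (a b : String) : String := String.ofList (a.toList ++ b.toList)

-- line_indent(line) = len(line) - len(line.lstrip())  (always ≥ 0, so Nat)
def pvLineIndent (line : String) : Nat :=
  line.toList.length - (PySem.Chars.lstrip line.toList).length

-- is_empty(line) = (line.strip() == '')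
def pvIsEmpty (line : String) : Bool := (PySem.Chars.strip line.toList).isEmpty

def pvStarts (line p : String) : Bool := PySem.Str.startswith line p

-- the 'n_good' loop of proc_body: walk body[::-1], decrement until the first non-blank
def pvNGood : List String → Nat → Nat
  | [], n => n
  | l :: rest, n => if ¬ pvIsEmpty l then n else pvNGood rest (n - 1)

-- proc_body(body, indent)
def pvProcBody (body : List String) (indent : Nat) : List String :=
  let spaces := pvSpaces indent
  let newBody := [".. plot::\n", pvCat spaces ":context:\n"]
  let plts := body.filter (fun l => PySem.Chars.startswith (PySem.Chars.strip l.toList) "plt.".toList)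
  let newBody := if plts.length = 0 then newBody ++ [pvCat spaces ":nofigs:\n"] else newBody
  let newBody := newBody ++ ["\n"]
  let nGood := pvNGood body.reverse body.length
  (body.take nGood).foldl (fun nb l =>
    if pvIsEmpty l then nb ++ [l]
    else
      let li := pvLineIndent l
      if li = indent then nb ++ [pvCat spaces (pvCat ">>> " (String.ofList (PySem.Chars.lstrip l.toList)))]
      else nb ++ [pvCat spaces (pvCat "... " (pvCat (pvSpaces (li - indent)) (String.ofList (PySem.Chars.lstrip l.toList))))])
    newBody

-- the matplotlib-line substitution of the 'in-pl' handler (identical code in both Pythons)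
def pvPlSub (line : String) : String :=
  if PySem.Chars.startswith (PySem.Chars.strip line.toList) "<matplotlib.".toList then
    pvCat (pvSpaces (pvLineIndent line)) "<...>\n"
  else if PySem.Chars.startswith (PySem.Chars.strip line.toList) "[<matplotlib.".toList then
    pvCat (pvSpaces (pvLineIndent line)) "[...]\n"
  else line

-- ===== PORT A (per-line state machine with fall-through) =====

inductive PvState
  | default
  | code0                                  -- 'code-block-line0'
  | body (bi : Nat) (bb : List String)     -- 'code-block-body' with block_indent, block_body
  | waiting                                -- 'waiting-for-pl'
  | pl0                                    -- 'in-pl-line0'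
  | pl (pi : Nat)                          -- 'in-pl' with pl_indent

-- _p_default(line, new_contents)
def pvPDefault (line : String) (nc : List String) : PvState × List String :=
  if pvStarts line ".. code:: python" then (.code0, nc)
  else if ¬ pvStarts line ".. image::" then (.default, nc ++ [line])
  else (.default, nc)

-- the 'waiting-for-pl' block
def pvWaitStep (nc : List String) (line : String) : PvState × List String :=
  if pvStarts line ".. parsed-literal::" then (.pl0, nc)
  else (.default, nc ++ ["\n", line])

-- the 'in-pl' block
def pvPlStep (pi : Nat) (nc : List String) (line : String) : PvState × List String :=
  if ¬ pvIsEmpty line ∧ pvLineIndent line < pi then pvPDefault line nc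
  else (.pl pi, nc ++ [pvPlSub line])

-- the 'code-block-body' block (falls through into 'waiting-for-pl' on the same line;
-- A's stale block_body.append(line) after the flush is unobservable: that list is never read again)
def pvBodyStep (bi : Nat) (bb : List String) (nc : List String) (line : String) : PvState × List String :=
  if ¬ pvIsEmpty line ∧ pvLineIndent line < bi then pvWaitStep (nc ++ pvProcBody bb bi) line
  else (.body bi (bb ++ [line]), nc)

-- one iteration of A's for-loop (the fall-through chain, state block by state block)
def pvStep (s : PvState) (nc : List String) (line : String) : PvState × List String :=
  match s with
  | .default => pvPDefault line nc
  | .code0 =>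
      if pvIsEmpty line then (.code0, nc)
      else pvBodyStep (pvLineIndent line) [] nc line
  | .body bi bb => pvBodyStep bi bb nc line
  | .waiting => pvWaitStep nc line
  | .pl0 =>
      if pvIsEmpty line then (.pl0, nc)
      else pvPlStep (pvLineIndent line) nc line
  | .pl pi => pvPlStep pi nc line

def proc_notebook (contents : List String) : List String :=
  (contents.foldl (fun (p : PvState × List String) line => pvStep p.1 p.2 line)
    (PvState.default, [])).2

-- ===== PORT B (cursor-based parser: nested loops, here the obvious mutual recursion on the
-- remaining lines; each function is one of Source B's while-loops) =====

mutual
-- the outer 'while i < n' dispatch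
def pvTop : List String → List String → List String
  | [], out => out
  | line :: rest, out =>
    if pvStarts line ".. code:: python" then pvSkipBlank rest out
    else if pvStarts line ".. image::" then pvTop rest out
    else pvTop rest (out ++ [line])
termination_by rest out => (rest.length, 0)

-- 'skip blank lines before the block body'
def pvSkipBlank : List String → List String → List String
  | [], out => out
  | line :: rest, out =>
    if pvIsEmpty line then pvSkipBlank rest out
    else pvBody (pvLineIndent line) [] (line :: rest) out
termination_by rest out => (rest.length, 2)

-- the block-body collection loop
def pvBody : Nat → List String → List String → List String → List String
  | _, _, [], out => out                   -- unterminated block is dropped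
  | bi, body, line :: rest, out =>
    if pvIsEmpty line ∨ bi ≤ pvLineIndent line then pvBody bi (body ++ [line]) rest out
    else pvAfter (line :: rest) (out ++ pvProcBody body bi)
termination_by bi body rest out => (rest.length, 1)

-- after the flush: parsed-literal, or restore the trailing blank
def pvAfter : List String → List String → List String
  | [], out => out
  | line :: rest, out =>
    if pvStarts line ".. parsed-literal::" then pvSkipBlankPl rest out
    else pvTop rest (out ++ ["\n", line])
termination_by rest out => (rest.length, 0)

-- 'skip blank lines' before the parsed-literal body
def pvSkipBlankPl : List String → List String → List String
  | [], out => out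
  | line :: rest, out =>
    if pvIsEmpty line then pvSkipBlankPl rest out
    else pvPl (pvLineIndent line) (line :: rest) out
termination_by rest out => (rest.length, 2)

-- the parsed-literal copy loop; on dedent re-dispatch the line at top level
def pvPl : Nat → List String → List String → List String
  | _, [], out => out
  | pi, line :: rest, out =>
    if ¬ pvIsEmpty line ∧ pvLineIndent line < pi then pvTop (line :: rest) out
    else pvPl pi rest (out ++ [pvPlSub line])
termination_by pi rest out => (rest.length, 1)
end

def proc_notebook_alt (contents : List String) : List String := pvTop contents []

-- ===== PRECONDITION & SPEC =====
def Spec_proc_notebook (contents : List String) (out : List String) : Prop := out = proc_notebook_alt contents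
instance (contents : List String) (out : List String) : Decidable (Spec_proc_notebook contents out) := by unfold Spec_proc_notebook; infer_instance

-- ===== CLAIM (what is proved, stated in full; the proofs are below) =====
def Claim_equal_proc_notebook : Prop := ∀ (contents : List String), Dom_proc_notebook contents → Spec_proc_notebook contents (proc_notebook contents)

-- ===== LEMMAS AND PROOFS =====

-- A's machine resumed from state s on the remaining lines
def pvRunA (s : PvState) (rest nc : List String) : List String :=
  (rest.foldl (fun (p : PvState × List String) line => pvStep p.1 p.2 line) (s, nc)).2

-- the B-side loop that corresponds to each A-state
def pvMatchB (s : PvState) (rest out : List String) : List String :=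
  match s with
  | .default => pvTop rest out
  | .code0 => pvSkipBlank rest out
  | .body bi bb => pvBody bi bb rest out
  | .waiting => pvAfter rest out
  | .pl0 => pvSkipBlankPl rest out
  | .pl pi => pvPl pi rest out

theorem pvRunA_cons (s : PvState) (line : String) (rest nc : List String) :
    pvRunA s (line :: rest) nc = pvRunA (pvStep s nc line).1 rest (pvStep s nc line).2 := rfl

theorem pvMain (rest : List String) : ∀ (s : PvState) (nc : List String),
    pvRunA s rest nc = pvMatchB s rest nc := by
  induction rest with
  | nil =>
    intro s nc
    cases s <;> simp [pvRunA, pvMatchB, pvTop, pvSkipBlank, pvBody, pvAfter, pvSkipBlankPl, pvPl]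
  | cons line rest ih =>
    intro s nc
    rw [pvRunA_cons]
    cases s with
    | default =>
      simp only [pvStep, pvPDefault, pvMatchB, pvTop]
      split_ifs <;> simp_all [pvMatchB]
    | code0 =>
      simp only [pvStep, pvMatchB, pvSkipBlank]
      by_cases he : pvIsEmpty line = true
      · rw [if_pos he, if_pos he]; exact ih _ _
      · rw [if_neg he, if_neg he]
        have hlt : ¬ (¬ pvIsEmpty line = true ∧ pvLineIndent line < pvLineIndent line) :=
          fun h => Nat.lt_irrefl _ h.2
        simp only [pvBodyStep]
        rw [if_neg hlt]
        simp only [pvBody]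
        rw [if_pos (Or.inr (le_refl _))]
        exact ih _ _
    | body bi bb =>
      simp only [pvStep, pvBodyStep, pvMatchB, pvBody]
      by_cases hc : ¬ pvIsEmpty line = true ∧ pvLineIndent line < bi
      · rw [if_pos hc]
        have : ¬ (pvIsEmpty line = true ∨ bi ≤ pvLineIndent line) := by
          rcases hc with ⟨h1, h2⟩
          rintro (h | h)
          · exact h1 h
          · omega
        rw [if_neg this]
        simp only [pvWaitStep, pvAfter]
        split_ifs <;> simp_all [pvMatchB]
      · rw [if_neg hc]
        have : pvIsEmpty line = true ∨ bi ≤ pvLineIndent line := by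
          rcases not_and_or.mp hc with h1 | h2
          · exact Or.inl (by simpa using h1)
          · exact Or.inr (by omega)
        rw [if_pos this]
        exact ih _ _
    | waiting =>
      simp only [pvStep, pvWaitStep, pvMatchB, pvAfter]
      split_ifs <;> simp_all [pvMatchB]
    | pl0 =>
      simp only [pvStep, pvMatchB, pvSkipBlankPl]
      by_cases he : pvIsEmpty line = true
      · rw [if_pos he, if_pos he]; exact ih _ _
      · rw [if_neg he, if_neg he]
        have hlt : ¬ (¬ pvIsEmpty line = true ∧ pvLineIndent line < pvLineIndent line) :=
          fun h => Nat.lt_irrefl _ h.2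
        simp only [pvPlStep]
        rw [if_neg hlt]
        simp only [pvPl]
        rw [if_neg hlt]
        exact ih _ _
    | pl pi =>
      simp only [pvStep, pvPlStep, pvMatchB, pvPl]
      by_cases hc : ¬ pvIsEmpty line = true ∧ pvLineIndent line < pi
      · rw [if_pos hc, if_pos hc]
        simp only [pvPDefault, pvTop]
        split_ifs <;> simp_all [pvMatchB]
      · rw [if_neg hc, if_neg hc]
        exact ih _ _

-- ===== VERDICT (by name: the statement is the Claim_ definition above) =====
theorem proc_notebook_spec : Claim_equal_proc_notebook := by
  intro contents _
  show proc_notebook contents = proc_notebook_alt contents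
  have := pvMain contents PvState.default []
  simpa [pvRunA, pvMatchB, proc_notebook, proc_notebook_alt] using this
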